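-- pv_equiv track=rewrite | github.com/Prince2412k2/Book_Visualizer | epy.py | find_curr_toc_id
-- ===== SOURCE A (Python) =====
-- def find_curr_toc_id(toc_idx, toc_sect, toc_secid, index, y):
--     ntoc = 0
--     for n, (i, j) in enumerate(zip(toc_idx, toc_sect)):
--         if i <= index:
--             if y >= toc_secid.get(j, 0):
--                 ntoc = n
--         else:
--             break
--     return ntoc
-- ===== SOURCE B (Python) =====
-- def find_curr_toc_id(toc_idx, toc_sect, toc_secid, index, y):
--     prefix = []
--     for i, j in zip(toc_idx, toc_sect):
--         if i > index:
--             break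
--         prefix.append(j)
--     for n in range(len(prefix) - 1, -1, -1):
--         if y >= toc_secid.get(prefix[n], 0):
--             return n
--     return 0
-- ===== Notes on version B (the rewrite author's own statement) =====
-- stated objective: alternative
-- what changed: Replaces the forward overwrite-the-last-match accumulator with building the valid prefix (entries up to the first index exceeding `index`) and then scanning it backward, returning at the first matching entry.
import Mathlib
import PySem

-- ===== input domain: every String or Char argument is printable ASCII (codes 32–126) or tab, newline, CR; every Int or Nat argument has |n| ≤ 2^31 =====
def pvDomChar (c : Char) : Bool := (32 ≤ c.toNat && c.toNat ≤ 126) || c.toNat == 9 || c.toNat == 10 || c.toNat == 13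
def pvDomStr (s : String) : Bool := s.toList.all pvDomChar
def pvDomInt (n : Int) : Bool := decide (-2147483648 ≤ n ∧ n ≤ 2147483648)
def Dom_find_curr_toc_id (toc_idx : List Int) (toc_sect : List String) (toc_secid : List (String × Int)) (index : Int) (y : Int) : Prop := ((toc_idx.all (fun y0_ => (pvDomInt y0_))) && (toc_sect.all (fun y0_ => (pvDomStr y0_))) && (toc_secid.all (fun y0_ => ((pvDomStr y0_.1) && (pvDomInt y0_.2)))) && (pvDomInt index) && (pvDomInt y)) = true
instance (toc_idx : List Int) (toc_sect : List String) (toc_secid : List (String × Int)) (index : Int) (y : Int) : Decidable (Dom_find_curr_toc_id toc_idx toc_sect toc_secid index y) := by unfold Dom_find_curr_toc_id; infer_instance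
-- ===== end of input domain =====

-- B replaces A's forward overwrite-the-last-match accumulator by a takewhile prefix plus a backward early-return scan (alternative decomposition, same cost).


-- dict.get(j, 0) on the association list: first match, default 0 (shared by both ports)
def secGetD (toc_secid : List (String × Int)) (j : String) : Int :=
  ((toc_secid.find? (fun p => p.1 == j)).map (·.2)).getD 0

-- ===== PORT A =====
-- A's loop: enumerate(zip(toc_idx, toc_sect)), break on i > index, overwrite ntoc on match
def pvA_loop (toc_secid : List (String × Int)) (index y : Int) :
    List (Int × String) → Int → Int → Int
  | [], _, ntoc => ntoc
  | (i, j) :: rest, n, ntoc =>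
    if i ≤ index then
      if y ≥ secGetD toc_secid j then
        pvA_loop toc_secid index y rest (n + 1) n
      else
        pvA_loop toc_secid index y rest (n + 1) ntoc
    else ntoc

def find_curr_toc_id (toc_idx : List Int) (toc_sect : List String) (toc_secid : List (String × Int)) (index : Int) (y : Int) : Int :=
  pvA_loop toc_secid index y (toc_idx.zip toc_sect) 0 0

-- ===== PORT B =====
-- B first builds the valid prefix (section ids up to the first toc index exceeding `index`)
def pvB_prefix (index : Int) : List (Int × String) → List String
  | [] => []
  | (i, j) :: rest => if i > index then [] else j :: pvB_prefix index rest

-- then scans it backward: `pvB_scan … (k+1)` is B's loop with current index k; returns at the first match, else falls through to 0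
def pvB_scan (toc_secid : List (String × Int)) (y : Int) (pre : List String) : Nat → Int
  | 0 => 0
  | k + 1 =>
    if y ≥ secGetD toc_secid (pre.getD k "") then (k : Int)
    else pvB_scan toc_secid y pre k

def find_curr_toc_id_alt (toc_idx : List Int) (toc_sect : List String) (toc_secid : List (String × Int)) (index : Int) (y : Int) : Int :=
  pvB_scan toc_secid y (pvB_prefix index (toc_idx.zip toc_sect)) (pvB_prefix index (toc_idx.zip toc_sect)).length

-- ===== PRECONDITION & SPEC =====
def Spec_find_curr_toc_id (toc_idx : List Int) (toc_sect : List String) (toc_secid : List (String × Int)) (index : Int) (y : Int) (out : Int) : Prop := out = find_curr_toc_id_alt toc_idx toc_sect toc_secid index y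
instance (toc_idx : List Int) (toc_sect : List String) (toc_secid : List (String × Int)) (index : Int) (y : Int) (out : Int) : Decidable (Spec_find_curr_toc_id toc_idx toc_sect toc_secid index y out) := by unfold Spec_find_curr_toc_id; infer_instance

-- ===== CLAIM (what is proved, stated in full; the proofs are below) =====
def Claim_equal_find_curr_toc_id : Prop := ∀ (toc_idx : List Int) (toc_sect : List String) (toc_secid : List (String × Int)) (index : Int) (y : Int), Dom_find_curr_toc_id toc_idx toc_sect toc_secid index y → Spec_find_curr_toc_id toc_idx toc_sect toc_secid index y (find_curr_toc_id toc_idx toc_sect toc_secid index y)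

-- ===== LEMMAS AND PROOFS =====

-- A's loop only ever sees the prefix pvB_prefix cuts out
def pvF_loop (toc_secid : List (String × Int)) (y : Int) :
    List String → Int → Int → Int
  | [], _, ntoc => ntoc
  | j :: rest, n, ntoc =>
    if y ≥ secGetD toc_secid j then
      pvF_loop toc_secid y rest (n + 1) n
    else
      pvF_loop toc_secid y rest (n + 1) ntoc

theorem pvA_eq_F (toc_secid : List (String × Int)) (index y : Int) :
    ∀ (zs : List (Int × String)) (n ntoc : Int),
      pvA_loop toc_secid index y zs n ntoc
        = pvF_loop toc_secid y (pvB_prefix index zs) n ntoc := by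
  intro zs
  induction zs with
  | nil => intro n ntoc; rfl
  | cons p rest ih =>
    intro n ntoc
    obtain ⟨i, j⟩ := p
    by_cases hi : i ≤ index
    · have hgt : ¬ i > index := by omega
      simp [pvA_loop, pvB_prefix, hi, hgt, pvF_loop, ih]
    · have hgt : i > index := by omega
      simp [pvA_loop, pvB_prefix, hi, hgt, pvF_loop]

theorem pvF_append (toc_secid : List (String × Int)) (y : Int)
    (pre : List String) (j : String) :
    ∀ (n ntoc : Int),
      pvF_loop toc_secid y (pre ++ [j]) n ntoc
        = if y ≥ secGetD toc_secid j then n + (pre.length : Int)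
          else pvF_loop toc_secid y pre n ntoc := by
  induction pre with
  | nil =>
    intro n ntoc
    by_cases h : y ≥ secGetD toc_secid j <;> simp [pvF_loop, h]
  | cons j' rest ih =>
    intro n ntoc
    by_cases h' : y ≥ secGetD toc_secid j'
    · simp only [List.cons_append, pvF_loop, if_pos h', ih]
      by_cases h : y ≥ secGetD toc_secid j <;> simp [h] <;> push_cast <;> ring
    · simp only [List.cons_append, pvF_loop, if_neg h', ih]
      by_cases h : y ≥ secGetD toc_secid j <;> simp [h] <;> push_cast <;> ring

theorem pvB_scan_append (toc_secid : List (String × Int)) (y : Int)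
    (pre : List String) (j : String) :
    ∀ (k : Nat), k ≤ pre.length →
      pvB_scan toc_secid y (pre ++ [j]) k = pvB_scan toc_secid y pre k := by
  intro k
  induction k with
  | zero => intro _; rfl
  | succ m ih =>
    intro hm
    have hget : (pre ++ [j]).getD m "" = pre.getD m "" := by
      have hmlt : m < pre.length := by omega
      simp [List.getD, List.getElem?_append_left hmlt]
    simp only [pvB_scan, hget]
    by_cases h : secGetD toc_secid (pre[m]?.getD "") ≤ y
    · simp [h]
    · simp [h, ih (by omega)]

theorem pvF_eq_scan (toc_secid : List (String × Int)) (y : Int) :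
    ∀ (pre : List String),
      pvF_loop toc_secid y pre 0 0 = pvB_scan toc_secid y pre pre.length := by
  intro pre
  induction pre using List.reverseRecOn with
  | nil => rfl
  | append_singleton pre j ih =>
    rw [pvF_append]
    have hlen : (pre ++ [j]).length = pre.length + 1 := by simp
    rw [hlen]
    have hget : (pre ++ [j]).getD pre.length "" = j := by
      simp [List.getD]
    simp only [pvB_scan, hget]
    by_cases h : secGetD toc_secid j ≤ y
    · simp [h]
    · simp [h, pvB_scan_append toc_secid y pre j pre.length (le_refl _), ih]

-- ===== VERDICT (by name: the statement is the Claim_ definition above) =====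
theorem find_curr_toc_id_spec : Claim_equal_find_curr_toc_id := by
  intro toc_idx toc_sect toc_secid index y _
  show find_curr_toc_id toc_idx toc_sect toc_secid index y
        = find_curr_toc_id_alt toc_idx toc_sect toc_secid index y
  unfold find_curr_toc_id find_curr_toc_id_alt
  rw [pvA_eq_F, pvF_eq_scan]
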